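-- pv_equiv track=rewrite | github.com/xkai-site/openmate | openmate_agent/approval.py | normalize_dir_prefix
-- ===== SOURCE A (Python) =====
-- def normalize_dir_prefix(path_value: str) -> str:
--     text = str(path_value or "").strip()
--     if text == "":
--         return ""
--     normalized = text.replace("\\", "/")
--     while "//" in normalized:
--         normalized = normalized.replace("//", "/")
--     if len(normalized) > 1 and normalized.endswith("/"):
--         normalized = normalized.rstrip("/")
--     return normalized
-- ===== SOURCE B (Python) =====
-- def normalize_dir_prefix(path_value: str) -> str:
--     text = str(path_value or "").strip()
--     if text == "":
--         return ""
--     out = []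
--     for ch in text:
--         c = "/" if ch == "\\" else ch
--         if c == "/" and out and out[-1] == "/":
--             continue
--         out.append(c)
--     if len(out) > 1 and out[-1] == "/":
--         out.pop()
--     return "".join(out)
-- ===== Notes on version B (the rewrite author's own statement) =====
-- stated objective: alternative
-- what changed: Replaced the replace-until-fixpoint loop (rescanning the whole string until no '//' remains) plus a separate rstrip('/') pass with a single left-to-right character scan that maps backslashes, skips a slash when the previous emitted character is a slash, and pops one trailing slash.
import Mathlib
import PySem

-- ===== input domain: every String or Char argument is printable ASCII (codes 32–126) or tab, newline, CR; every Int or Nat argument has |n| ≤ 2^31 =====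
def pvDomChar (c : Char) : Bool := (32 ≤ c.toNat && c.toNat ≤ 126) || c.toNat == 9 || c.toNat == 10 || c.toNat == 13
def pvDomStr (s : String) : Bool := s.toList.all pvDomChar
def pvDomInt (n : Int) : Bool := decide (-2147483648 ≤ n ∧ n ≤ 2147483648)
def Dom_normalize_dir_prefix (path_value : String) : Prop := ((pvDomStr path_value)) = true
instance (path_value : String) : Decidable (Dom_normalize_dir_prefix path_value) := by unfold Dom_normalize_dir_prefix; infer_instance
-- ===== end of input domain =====

-- B replaces A's replace-until-fixpoint '//' loop plus rstrip('/') pass by one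
-- left-to-right character scan that collapses slash runs and pops one trailing slash.


-- ===== PORT A =====
-- What ONE Python-level `s.replace("//", "/")` pass computes (left-to-right,
-- non-overlapping); needed by the port's `while` loop for its termination argument.
def pvRep : List Char → List Char
  | c :: d :: t => if c = '/' ∧ d = '/' then '/' :: pvRep t else c :: pvRep (d :: t)
  | l => l

theorem pvRep_go (fuel : Nat) (l acc : List Char) (h : l.length ≤ fuel) :
    PySem.Chars.replace.go ['/', '/'] ['/'] fuel l acc = acc.reverse ++ pvRep l := by
  induction fuel generalizing l acc with
  | zero =>
    have hnil : l = [] := by cases l <;> simp_all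
    subst hnil; simp [PySem.Chars.replace.go, pvRep]
  | succ n ih =>
    cases l with
    | nil => simp [PySem.Chars.replace.go, pvRep]
    | cons c t =>
      rw [PySem.Chars.replace.go]
      by_cases hp : List.isPrefixOf ['/', '/'] (c :: t) = true
      · simp only [hp, if_true]
        rcases t with _ | ⟨d, t'⟩
        · simp [List.isPrefixOf] at hp
        · have hc : c = '/' ∧ d = '/' := by
            have := by simpa [List.isPrefixOf] using hp
            exact ⟨this.1.symm, this.2.symm⟩
          obtain ⟨rfl, rfl⟩ := hc
          rw [show List.drop (['/', '/'] : List Char).length ('/' :: '/' :: t') = t' from rfl,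
              show (['/'] : List Char).reverse ++ acc = '/' :: acc from rfl,
              ih t' ('/' :: acc) (by simp at h ⊢; omega)]
          rw [pvRep, if_pos ⟨rfl, rfl⟩]
          simp
      · simp only [hp]
        rw [ih t (c :: acc) (by simp at h ⊢; omega)]
        have hrep : pvRep (c :: t) = c :: pvRep t := by
          rcases t with _ | ⟨d, t'⟩
          · rfl
          · rw [pvRep, if_neg (by rintro ⟨rfl, rfl⟩; simp [List.isPrefixOf] at hp)]
        simp [hrep]

theorem replace_eq_pvRep (s : List Char) :
    PySem.Chars.replace s ['/', '/'] ['/'] = pvRep s := by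
  rw [PySem.Chars.replace]
  simpa using pvRep_go s.length s [] le_rfl

theorem pvRep_length_le (s : List Char) : (pvRep s).length ≤ s.length := by
  fun_induction pvRep s with
  | case1 c d t hcd ih => simp_all; omega
  | case2 c d t hcd ih => simp_all
  | case3 l h => exact le_rfl

theorem pvRep_length_lt (s : List Char) (h : ['/', '/'] <:+: s) :
    (pvRep s).length < s.length := by
  induction s with
  | nil => simp at h
  | cons c t ih =>
    rcases t with _ | ⟨d, t'⟩
    · rcases List.infix_cons_iff.mp h with hpre | hinf
      · rcases List.prefix_cons_iff.mp hpre with h0 | ⟨u, hu, hp⟩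
        · simp at h0
        · cases hu; simp at hp
      · simp at hinf
    · by_cases hcd : c = '/' ∧ d = '/'
      · rw [pvRep, if_pos hcd]
        have := pvRep_length_le t'
        simp; omega
      · rw [pvRep, if_neg hcd]
        have hinf : ['/', '/'] <:+: d :: t' := by
          rcases List.infix_cons_iff.mp h with hpre | hinf
          · exfalso
            rcases List.prefix_cons_iff.mp hpre with h0 | ⟨u, hu, hp⟩
            · simp at h0
            · cases hu
              rcases List.prefix_cons_iff.mp hp with h0 | ⟨v, hv, _⟩
              · simp at h0
              · cases hv; exact hcd ⟨rfl, rfl⟩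
          · exact hinf
        have := ih hinf
        simp at this ⊢; omega

-- A's `while "//" in normalized: normalized = normalized.replace("//", "/")` loop.
def pvLoopA (s : List Char) : List Char :=
  if PySem.Chars.isIn ['/', '/'] s then pvLoopA (PySem.Chars.replace s ['/', '/'] ['/']) else s
termination_by s.length
decreasing_by
  rw [replace_eq_pvRep]
  exact pvRep_length_lt s ((PySem.Chars.isIn_iff_infix _ _).mp (by assumption))

def normalize_dir_prefix (path_value : String) : String :=
  -- `str(path_value or "")` is the identity on a str argument ("" stays "", strip "" = "")
  let text := PySem.Str.strip path_value
  if text = "" then ""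
  else
    let n0 := PySem.Chars.replace text.toList ['\\'] ['/']   -- text.replace("\\", "/")
    let n1 := pvLoopA n0                                      -- the while loop
    let n2 := if 1 < n1.length && PySem.Chars.endswith n1 ['/']
              then (n1.reverse.dropWhile (· == '/')).reverse  -- hand port of rstrip("/"): drops trailing '/' chars (exact)
              else n1
    String.ofList n2

-- ===== PORT B =====
-- `c = "/" if ch == "\\" else ch` of Source B's loop body, as a named helper.
def pvSlash (c : Char) : Char := if c == '\\' then '/' else c

-- B appends to a Python list `out`; the port conses onto `acc`, which therefore holds
-- `out` REVERSED: out[-1] is acc.head!, out.pop() is acc.tail, the final join reverses.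
def pvStep (acc : List Char) (ch : Char) : List Char :=
  let c := pvSlash ch
  if c == '/' && !acc.isEmpty && acc.head! == '/' then acc else c :: acc

def normalize_dir_prefix_alt (path_value : String) : String :=
  let text := PySem.Str.strip path_value
  if text = "" then ""
  else
    let out := text.toList.foldl pvStep []
    let out := if 1 < out.length && out.head! == '/' then out.tail else out
    String.ofList out.reverse

-- ===== PRECONDITION & SPEC =====
def Spec_normalize_dir_prefix (path_value : String) (out : String) : Prop := out = normalize_dir_prefix_alt path_value
instance (path_value : String) (out : String) : Decidable (Spec_normalize_dir_prefix path_value out) := by unfold Spec_normalize_dir_prefix; infer_instance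

-- ===== CLAIM (what is proved, stated in full; the proofs are below) =====
def Claim_equal_normalize_dir_prefix : Prop := ∀ (path_value : String), Dom_normalize_dir_prefix path_value → Spec_normalize_dir_prefix path_value (normalize_dir_prefix path_value)

-- ===== LEMMAS AND PROOFS =====

-- The common denominator of both programs: every run of '/' collapsed to one '/'
-- (keeping the last slash of each run).
def pvCollapse : List Char → List Char
  | [] => []
  | c :: t => if c = '/' ∧ t.head? = some '/' then pvCollapse t else c :: pvCollapse t

-- B's scan with the previous emitted character made explicit.
def pvCrun : Option Char → List Char → List Char
  | _, [] => []
  | prev, ch :: t =>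
      let c := pvSlash ch
      if c = '/' ∧ prev = some '/' then pvCrun prev t else c :: pvCrun (some c) t

theorem head?_pvCollapse (l : List Char) : (pvCollapse l).head? = l.head? := by
  fun_induction pvCollapse l with
  | case1 => rfl
  | case2 c t h ih =>
    obtain ⟨rfl, hh⟩ := h
    rw [ih, hh]
    simp
  | case3 c t h ih => rfl

theorem single_prefix (x : List Char) : ['/'] <+: x ↔ x.head? = some '/' := by
  cases x with
  | nil => simp
  | cons a y => simp [List.cons_prefix_cons, eq_comm]

theorem pvCollapse_eq_self (l : List Char) (h : ¬ ['/', '/'] <:+: l) : pvCollapse l = l := by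
  induction l with
  | nil => rfl
  | cons c t ih =>
    have h1 : ¬ ['/', '/'] <:+: t := fun hh => h (List.infix_cons_iff.mpr (Or.inr hh))
    rw [pvCollapse, if_neg, ih h1]
    rintro ⟨rfl, hh⟩
    exact h (List.infix_cons_iff.mpr (Or.inl (by
      rw [show (['/', '/'] : List Char) = '/' :: ['/'] from rfl, List.cons_prefix_cons]
      exact ⟨rfl, (single_prefix t).mpr hh⟩)))

theorem noInfix_pvCollapse (l : List Char) : ¬ ['/', '/'] <:+: pvCollapse l := by
  induction l with
  | nil => simp [pvCollapse]
  | cons c t ih =>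
    rw [pvCollapse]
    split_ifs with hc
    · exact ih
    · intro hinf
      rcases List.infix_cons_iff.mp hinf with hpre | hinf'
      · rw [show (['/', '/'] : List Char) = '/' :: ['/'] from rfl, List.cons_prefix_cons] at hpre
        obtain ⟨hc1, hp⟩ := hpre
        rw [single_prefix, head?_pvCollapse] at hp
        exact hc ⟨hc1.symm, hp⟩
      · exact ih hinf'

theorem pvRep_head? (l : List Char) : (pvRep l).head? = l.head? := by
  fun_induction pvRep l with
  | case1 c d t h ih => obtain ⟨rfl, rfl⟩ := h; rfl
  | case2 c d t h ih => rfl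
  | case3 l h => rfl

theorem pvCollapse_slash_cons (a b : List Char) (hh : a.head? = b.head?)
    (he : pvCollapse a = pvCollapse b) : pvCollapse ('/' :: a) = pvCollapse ('/' :: b) := by
  rw [pvCollapse, pvCollapse, hh, he]

theorem pvCollapse_pvRep (l : List Char) : pvCollapse (pvRep l) = pvCollapse l := by
  fun_induction pvRep l with
  | case1 c d t h ih =>
    obtain ⟨rfl, rfl⟩ := h
    have step : pvCollapse ('/' :: pvRep t) = pvCollapse ('/' :: t) :=
      pvCollapse_slash_cons _ _ (pvRep_head? t) ih
    rw [step, show pvCollapse ('/' :: '/' :: t) = pvCollapse ('/' :: t) from by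
      rw [pvCollapse]; simp]
  | case2 c d t h ih =>
    have hh : (pvRep (d :: t)).head? = some d := by rw [pvRep_head?]; rfl
    rw [pvCollapse, hh, pvCollapse, ih]
    simp
  | case3 l h => rfl

theorem pvLoopA_eq (n : Nat) : ∀ s : List Char, s.length ≤ n → pvLoopA s = pvCollapse s := by
  induction n with
  | zero =>
    intro s hs
    have hnil : s = [] := by cases s <;> simp_all
    subst hnil
    rw [pvLoopA, if_neg (by decide)]
    rfl
  | succ n ih =>
    intro s hs
    rw [pvLoopA]
    by_cases h : PySem.Chars.isIn ['/', '/'] s = true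
    · rw [if_pos h, replace_eq_pvRep]
      have hlt := pvRep_length_lt s ((PySem.Chars.isIn_iff_infix _ _).mp h)
      rw [ih (pvRep s) (by omega), pvCollapse_pvRep]
    · rw [if_neg h]
      exact (pvCollapse_eq_self s ((PySem.Chars.isIn_eq_false_iff _ _).mp (by simpa using h))).symm

theorem replace_bs_go (fuel : Nat) (l acc : List Char) (h : l.length ≤ fuel) :
    PySem.Chars.replace.go ['\\'] ['/'] fuel l acc = acc.reverse ++ l.map pvSlash := by
  induction fuel generalizing l acc with
  | zero =>
    have hnil : l = [] := by cases l <;> simp_all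
    subst hnil; simp [PySem.Chars.replace.go]
  | succ n ih =>
    cases l with
    | nil => simp [PySem.Chars.replace.go]
    | cons c t =>
      rw [PySem.Chars.replace.go]
      by_cases hp : List.isPrefixOf ['\\'] (c :: t) = true
      · have hc : c = '\\' := by
          have := by simpa [List.isPrefixOf] using hp
          exact this.symm
        subst hc
        simp only [hp, if_true]
        rw [show List.drop (['\\'] : List Char).length ('\\' :: t) = t from rfl,
            show (['/'] : List Char).reverse ++ acc = '/' :: acc from rfl,
            ih t ('/' :: acc) (by simp at h ⊢; omega)]
        simp [pvSlash]
      · have hc : c ≠ '\\' := by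
          intro hcc; subst hcc; simp [List.isPrefixOf] at hp
        simp only [hp]
        rw [ih t (c :: acc) (by simp at h ⊢; omega)]
        simp [pvSlash, hc]

theorem replace_bs_eq (s : List Char) :
    PySem.Chars.replace s ['\\'] ['/'] = s.map pvSlash := by
  rw [PySem.Chars.replace]
  simpa using replace_bs_go s.length s [] le_rfl

theorem pvStep_eq (acc : List Char) (ch : Char) :
    pvStep acc ch = if pvSlash ch = '/' ∧ acc.head? = some '/' then acc else pvSlash ch :: acc := by
  rcases acc with _ | ⟨a, acc'⟩
  · simp [pvStep]
  · by_cases h1 : pvSlash ch = '/' <;> by_cases h2 : a = '/' <;>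
      simp [pvStep, List.head!, h1, h2]

theorem foldl_pvStep (l : List Char) : ∀ acc : List Char,
    l.foldl pvStep acc = (pvCrun acc.head? l).reverse ++ acc := by
  induction l with
  | nil => intro acc; simp [pvCrun]
  | cons ch t ih =>
    intro acc
    rw [List.foldl_cons, pvCrun, pvStep_eq]
    by_cases hc : pvSlash ch = '/' ∧ acc.head? = some '/'
    · rw [if_pos hc, if_pos hc, ih acc]
    · rw [if_neg hc, if_neg hc, ih (pvSlash ch :: acc)]
      simp

theorem pvCrun_some (l : List Char) : ∀ c : Char,
    c :: pvCrun (some c) l = pvCollapse (c :: l.map pvSlash) := by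
  induction l with
  | nil =>
    intro c
    rw [pvCrun]
    simp [pvCollapse]
  | cons ch t ih =>
    intro c
    rw [pvCrun]
    simp only [List.map_cons]
    by_cases hc : pvSlash ch = '/' ∧ c = '/'
    · obtain ⟨h1, rfl⟩ := hc
      rw [if_pos ⟨h1, rfl⟩]
      rw [show pvCollapse ('/' :: pvSlash ch :: t.map pvSlash) = pvCollapse (pvSlash ch :: t.map pvSlash) from by
        rw [pvCollapse]; simp [h1]]
      rw [h1]
      exact ih '/'
    · have hne : ¬ (pvSlash ch = '/' ∧ (some c : Option Char) = some '/') := by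
        rintro ⟨h1, h2⟩; simp at h2; exact hc ⟨h1, h2⟩
      rw [if_neg hne]
      rw [show pvCollapse (c :: pvSlash ch :: t.map pvSlash) = c :: pvCollapse (pvSlash ch :: t.map pvSlash) from by
        rw [pvCollapse, if_neg (by rintro ⟨rfl, hh⟩; simp at hh; exact hc ⟨hh, rfl⟩)]]
      rw [ih (pvSlash ch)]

theorem pvCrun_none (l : List Char) : pvCrun none l = pvCollapse (l.map pvSlash) := by
  cases l with
  | nil => rfl
  | cons ch t =>
    rw [pvCrun]
    simp only [List.map_cons]
    rw [if_neg (by rintro ⟨_, h⟩; simp at h)]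
    rw [show pvCollapse (pvSlash ch :: t.map pvSlash) = pvSlash ch :: pvCrun (some (pvSlash ch)) t from
      (pvCrun_some t (pvSlash ch)).symm]

-- ===== VERDICT (by name: the statement is the Claim_ definition above) =====
theorem normalize_dir_prefix_spec : Claim_equal_normalize_dir_prefix := by
  intro path_value _
  unfold Spec_normalize_dir_prefix normalize_dir_prefix normalize_dir_prefix_alt
  by_cases h0 : PySem.Str.strip path_value = ""
  · simp [h0]
  · simp only [h0, if_false]
    set t : List Char := (PySem.Str.strip path_value).toList with ht
    rw [replace_bs_eq, pvLoopA_eq (t.map pvSlash).length _ le_rfl, foldl_pvStep]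
    set r : List Char := pvCollapse (t.map pvSlash) with hr
    rw [show ([] : List Char).head? = none from rfl, pvCrun_none, ← hr]
    simp only [List.append_nil, List.length_reverse]
    have hnoinf : ¬ ['/', '/'] <:+: r := hr ▸ noInfix_pvCollapse (t.map pvSlash)
    rcases hrr : r.reverse with _ | ⟨a, rest⟩
    · have : r = [] := by simpa using congrArg List.reverse hrr
      simp [this]
    · have hrval : r = (a :: rest).reverse := by
        rw [← hrr, List.reverse_reverse]
      by_cases hlen : 1 < r.length
      · by_cases ha : a = '/'
        · -- trailing slash present: A rstrips it, B pops it
          subst ha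
          have hend : PySem.Chars.endswith r ['/'] = true := by
            rw [PySem.Chars.endswith_iff, hrval]
            exact ⟨rest.reverse, by simp⟩
          rcases rest with _ | ⟨b, rest'⟩
          · exfalso
            have : r.length = 1 := by rw [hrval]; rfl
            omega
          have hb : b ≠ '/' := by
            rintro rfl
            exact hnoinf (by rw [hrval]; exact ⟨rest'.reverse, [], by simp⟩)
          rw [if_pos (by simp [hlen, hend]), if_pos (by simp [hlen, List.head!])]
          rw [List.dropWhile_cons, if_pos (by simp), List.dropWhile_cons, if_neg (by simp [hb])]
          simp
        · -- no trailing slash: both branches are skipped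
          have hend : PySem.Chars.endswith r ['/'] = false := by
            rw [Bool.eq_false_iff]
            intro hs
            rw [PySem.Chars.endswith_iff] at hs
            have hp : (['/'] : List Char) <+: r.reverse := by
              rw [show (['/'] : List Char) = List.reverse ['/'] from rfl]
              exact List.reverse_prefix.mpr hs
            rw [hrr, single_prefix] at hp
            simp at hp
            exact ha hp
          rw [if_neg (by simp [hend]), if_neg (by simp [List.head!, ha]), hrval]
      · rw [if_neg (by simp [hlen]), if_neg (by simp [hlen]), hrval]
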